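-- pv_equiv track=rewrite | github.com/MandyMeindersma/ProgrammingContests | GoogleIO/ceo.py | find_ceo
-- ===== SOURCE A (Python) =====
-- def find_ceo(array_of_ppl):
--     highest=array_of_ppl[0]
--     for i in range(highest, 0, -1):
--         try:
--             array_of_ppl.pop(i)
--         except:
--             pass
--     if highest != 0:
--         array_of_ppl.pop(0)
--     return len(array_of_ppl) + highest
-- ===== SOURCE B (Python) =====
-- def find_ceo(array_of_ppl):
--     # Closed-form O(1) re-implementation; does not mutate its argument
--     # (A destructively pops from the list; return values agree).
--     n = len(array_of_ppl)
--     h = array_of_ppl[0]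
--     if h > 0:
--         return max(h, n - 1)
--     if h == 0:
--         return n
--     return n - 1 + h
-- ===== Notes on version B (the rewrite author's own statement) =====
-- stated objective: faster
-- what changed: Replaces the O(highest) pop-loop over the mutated list with a closed-form arithmetic formula in n = len(array) and h = array[0] (max(h, n-1) for h>0, n for h=0, n-1+h for h<0); B does not mutate the argument.
import Mathlib
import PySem

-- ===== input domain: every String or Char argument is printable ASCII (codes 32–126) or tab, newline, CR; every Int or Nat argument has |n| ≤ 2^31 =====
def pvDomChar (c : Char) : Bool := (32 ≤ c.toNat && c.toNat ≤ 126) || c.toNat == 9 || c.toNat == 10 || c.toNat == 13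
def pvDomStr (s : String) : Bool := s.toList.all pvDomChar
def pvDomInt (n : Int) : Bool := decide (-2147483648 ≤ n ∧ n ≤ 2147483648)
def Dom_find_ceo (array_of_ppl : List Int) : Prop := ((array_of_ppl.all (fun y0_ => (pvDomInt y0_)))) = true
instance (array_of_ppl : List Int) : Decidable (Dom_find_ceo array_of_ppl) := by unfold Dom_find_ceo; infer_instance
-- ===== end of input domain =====

-- B replaces A's O(highest) pop-loop by a closed-form formula (objective: faster).
-- A destructively pops from its argument list and B does not; the equivalence proved here is about the RETURN value only.

-- ===== PORT A =====
-- body of A's for-loop: 'try: array_of_ppl.pop(i) except: pass'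
def popStep (a : List Int) (i : Int) : List Int :=
  match PySem.List.pop? a i with
  | some p => p.2
  | none => a

def find_ceo (array_of_ppl : List Int) : Int :=
  match PySem.List.pyGet? array_of_ppl 0 with
  | none => 0   -- A raises IndexError on []; excluded by Pre_
  | some highest =>
    let arr1 := (PySem.List.pyRange highest 0 (-1)).foldl popStep array_of_ppl
    let arr2 :=
      if highest ≠ 0 then
        match PySem.List.pop? arr1 0 with
        | some p => p.2
        | none => arr1   -- pop(0) on []: unreachable under Pre_
      else arr1
    (arr2.length : Int) + highest

-- ===== PORT B =====
def find_ceo_alt (array_of_ppl : List Int) : Int :=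
  match array_of_ppl with
  | [] => 0   -- B raises IndexError on []; excluded by Pre_
  | h :: _ =>
    let n : Int := array_of_ppl.length
    if h > 0 then max h (n - 1)
    else if h = 0 then n
    else n - 1 + h

-- ===== PRECONDITION & SPEC =====
-- Pre_ excludes exactly the empty list, on which both A and B raise IndexError (array_of_ppl[0]).
def Pre_find_ceo (array_of_ppl : List Int) : Prop := array_of_ppl ≠ []
instance (array_of_ppl : List Int) : Decidable (Pre_find_ceo array_of_ppl) := by unfold Pre_find_ceo; infer_instance
def pvWitness_find_ceo : List Int := [2, 5, 7]

def Spec_find_ceo (array_of_ppl : List Int) (out : Int) : Prop := out = find_ceo_alt array_of_ppl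
instance (array_of_ppl : List Int) (out : Int) : Decidable (Spec_find_ceo array_of_ppl out) := by unfold Spec_find_ceo; infer_instance

-- ===== CLAIM (what is proved, stated in full; the proofs are below) =====
def Claim_equal_find_ceo : Prop := ∀ (array_of_ppl : List Int), Dom_find_ceo array_of_ppl → Pre_find_ceo array_of_ppl → Spec_find_ceo array_of_ppl (find_ceo array_of_ppl)

-- ===== LEMMAS AND PROOFS =====

theorem pop?_of_len_le (a : List Int) (i : Int) (h : (a.length : Int) ≤ i) :
    PySem.List.pop? a i = none := by
  have hidx : PySem.List.pyIdx? a.length i = none := by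
    unfold PySem.List.pyIdx?
    split_ifs <;> first | rfl | omega
  simp [PySem.List.pop?, hidx]

-- the length of the list after A's countdown pop-loop over range(i, 0, -1)
theorem loop_len (i : Nat) : ∀ (a : List Int), 1 ≤ a.length →
    ((PySem.List.pyRange (i : Int) 0 (-1)).foldl popStep a).length
      = a.length - min i (a.length - 1) := by
  induction i with
  | zero =>
    intro a ha
    rw [PySem.List.pyRange_neg_one_eq_nil (by norm_num)]
    simp
  | succ k ih =>
    intro a ha
    rw [PySem.List.pyRange_neg_one_cons (by positivity)]
    have hcast : ((k + 1 : Nat) : Int) - 1 = (k : Int) := by push_cast; ring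
    rw [List.foldl_cons, hcast]
    by_cases hlt : k + 1 < a.length
    · have hpop := PySem.List.pop?_natCast a (k + 1) hlt
      have hstep : popStep a ((k + 1 : Nat) : Int) = a.eraseIdx (k + 1) := by
        unfold popStep; rw [hpop]
      rw [hstep, ih _ (by simp [List.length_eraseIdx, hlt]; omega)]
      simp [List.length_eraseIdx, hlt]
      omega
    · have hstep : popStep a ((k + 1 : Nat) : Int) = a := by
        unfold popStep
        rw [pop?_of_len_le a _ (by push_cast; omega)]
      rw [hstep, ih _ ha]
      omega

-- ===== VERDICT (by name: the statement is the Claim_ definition above) =====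
theorem find_ceo_spec : Claim_equal_find_ceo := by
  intro xs _ hpre
  unfold Spec_find_ceo
  match xs with
  | [] => exact absurd rfl hpre
  | h :: t =>
    have hget : PySem.List.pyGet? (h :: t) 0 = some h := by
      simp [PySem.List.pyGet?, PySem.List.pyIdx?]
    unfold find_ceo find_ceo_alt
    simp only [hget]
    rcases lt_trichotomy h 0 with hneg | hz | hpos
    · -- h < 0 : loop is empty, then pop(0)
      rw [PySem.List.pyRange_neg_one_eq_nil (le_of_lt hneg)]
      simp only [List.foldl_nil]
      rw [if_pos (by omega), PySem.List.pop?_zero_cons]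
      rw [if_neg (by omega), if_neg (by omega)]
      simp
    · -- h = 0 : loop empty, no pop(0)
      subst hz
      rw [PySem.List.pyRange_neg_one_eq_nil (by norm_num)]
      simp
    · -- h > 0 : loop pops min(h, len-1) elements, then pop(0)
      have hL : 1 ≤ (h :: t).length := by simp
      have hNh : ((h.toNat : Nat) : Int) = h := Int.toNat_of_nonneg (le_of_lt hpos)
      have hlen := loop_len h.toNat (h :: t) hL
      rw [hNh] at hlen
      rw [if_pos (by omega)]
      set arr1 := (PySem.List.pyRange h 0 (-1)).foldl popStep (h :: t) with harr1
      have harr1len : 1 ≤ arr1.length := by rw [hlen]; simp; omega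
      obtain ⟨y, ys, hys⟩ := List.exists_cons_of_ne_nil
        (fun hnil => by rw [hnil] at harr1len; simp at harr1len : arr1 ≠ [])
      rw [hys, PySem.List.pop?_zero_cons]
      have hyslen : ys.length + 1 = arr1.length := by rw [hys]; simp
      rw [if_pos (by omega)]
      rw [hlen] at hyslen
      simp only [List.length_cons] at hyslen ⊢
      omega
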